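-- pv_equiv track=rewrite | github.com/Vineeth1512/Python-problem-solving | Day-10/day10.py | duplicate_digit
-- ===== SOURCE A (Python) =====
-- def duplicate_digit(num):
--     duplicate_list = []
--     while num > 0:
--         digit = num % 10
--         if digit in duplicate_list:
--             return True
--         else:
--             duplicate_list.append(digit)
--         num = num // 10
--     return False
-- ===== SOURCE B (Python) =====
-- def duplicate_digit(num):
--     if num <= 0:
--         return False
--     s = str(num)
--     return len(set(s)) != len(s)
-- ===== Notes on version B (the rewrite author's own statement) =====
-- stated objective: idiomatic
-- what changed: Replaces the digit-by-digit mod/div loop with an early-exit membership scan by one str(num) conversion and a single set-size comparison len(set(s)) != len(s).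
import Mathlib
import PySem

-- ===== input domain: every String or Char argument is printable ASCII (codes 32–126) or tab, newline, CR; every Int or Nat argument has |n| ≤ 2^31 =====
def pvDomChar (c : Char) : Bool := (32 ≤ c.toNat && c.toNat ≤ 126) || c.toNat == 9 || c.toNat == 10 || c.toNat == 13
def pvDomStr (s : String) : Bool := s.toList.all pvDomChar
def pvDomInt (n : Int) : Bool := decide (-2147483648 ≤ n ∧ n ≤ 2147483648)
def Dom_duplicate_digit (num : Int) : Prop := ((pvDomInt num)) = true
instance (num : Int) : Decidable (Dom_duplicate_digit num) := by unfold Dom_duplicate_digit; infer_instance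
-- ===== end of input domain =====

-- B replaces A's digit-by-digit mod/div loop (early-exit membership scan against a growing
-- list) by one str(num) conversion and a single set-size comparison (idiomatic, not faster).

-- ===== PORT A =====
-- the while-loop of A: state = (num, duplicate_list)
def duplicateGo (num : Int) (duplicate_list : List Int) : Bool :=
  if _h : num > 0 then
    let digit := PySem.Int.mod num 10
    if digit ∈ duplicate_list then true
    else duplicateGo (PySem.Int.floordiv num 10) (duplicate_list ++ [digit])
  else false
termination_by num.toNat
decreasing_by
  have h10 : (0:Int) < 10 := by omega
  have h1 : PySem.Int.floordiv num 10 < num :=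
    (PySem.Int.floordiv_lt_iff_lt_mul h10).mpr (by omega)
  have _h2 : (0:Int) ≤ PySem.Int.floordiv num 10 :=
    (PySem.Int.le_floordiv_iff_mul_le h10).mpr (by omega)
  omega

def duplicate_digit (num : Int) : Bool := duplicateGo num []

-- ===== PORT B =====
def duplicate_digit_alt (num : Int) : Bool :=
  if num ≤ 0 then false
  else
    let s := PySem.Int.toStr num
    decide (PySem.Set.len (PySem.Set.ofList s.toList) ≠ PySem.Str.len s)

-- ===== PRECONDITION & SPEC =====
def Spec_duplicate_digit (num : Int) (out : Bool) : Prop := out = duplicate_digit_alt num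
instance (num : Int) (out : Bool) : Decidable (Spec_duplicate_digit num out) := by unfold Spec_duplicate_digit; infer_instance

-- ===== CLAIM (what is proved, stated in full; the proofs are below) =====
def Claim_equal_duplicate_digit : Prop := ∀ (num : Int), Dom_duplicate_digit num → Spec_duplicate_digit num (duplicate_digit num)

-- ===== LEMMAS AND PROOFS =====

-- the foldl of Set.add can add at most one element per input element
lemma foldl_add_length_le {α : Type} [BEq α] (cs : List α) (s : PySem.Set α) :
    (cs.foldl PySem.Set.add s).length ≤ s.length + cs.length := by
  induction cs generalizing s with
  | nil => simp
  | cons c cs ih =>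
    simp only [List.foldl_cons, List.length_cons]
    have := ih (PySem.Set.add s c)
    have hadd : (PySem.Set.add s c).length ≤ s.length + 1 := by
      unfold PySem.Set.add
      split_ifs <;> simp
    omega

-- the foldl of Set.add adds exactly one element per input element iff the inputs are
-- pairwise distinct and all new
lemma foldl_add_length_eq_iff {α : Type} [BEq α] [LawfulBEq α] (cs : List α) (s : PySem.Set α) :
    ((cs.foldl PySem.Set.add s).length = s.length + cs.length) ↔
      (cs.Nodup ∧ ∀ x ∈ cs, x ∉ s) := by
  induction cs generalizing s with
  | nil => simp
  | cons c cs ih =>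
    simp only [List.foldl_cons, List.length_cons]
    by_cases hc : c ∈ s
    · have hs : PySem.Set.add s c = s := by
        unfold PySem.Set.add PySem.Set.contains
        simp [hc]
      rw [hs]
      have hle := foldl_add_length_le cs s
      constructor
      · intro h; omega
      · rintro ⟨-, hnew⟩; exact absurd hc (hnew c (by simp))
    · have hs : PySem.Set.add s c = s ++ [c] := by
        unfold PySem.Set.add PySem.Set.contains
        simp [hc]
      rw [hs]
      rw [show s.length + (cs.length + 1) = (s ++ [c]).length + cs.length by simp; omega]
      rw [ih (s ++ [c])]
      constructor
      · rintro ⟨hnd, hnew⟩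
        refine ⟨List.nodup_cons.mpr ⟨fun hmem => ?_, hnd⟩, ?_⟩
        · have := hnew c hmem; simp at this
        · intro x hx
          rcases List.mem_cons.mp hx with rfl | hx
          · exact hc
          · have := hnew x hx; simp at this; exact this.1
      · rintro ⟨hnd, hnew⟩
        rcases List.nodup_cons.mp hnd with ⟨hcn, hnd'⟩
        refine ⟨hnd', fun x hx => ?_⟩
        simp only [List.mem_append, List.mem_singleton]
        rintro (hxs | rfl)
        · exact hnew x (List.mem_cons_of_mem _ hx) hxs
        · exact hcn hx
      
lemma ofList_length_eq_iff {α : Type} [BEq α] [LawfulBEq α] (cs : List α) :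
    ((PySem.Set.ofList cs).length = cs.length) ↔ cs.Nodup := by
  unfold PySem.Set.ofList
  have h2 := foldl_add_length_eq_iff cs (PySem.Set.empty (α := α))
  simp only [PySem.Set.empty, List.length_nil, Nat.zero_add, List.not_mem_nil,
    not_false_iff, implies_true, and_true] at h2
  exact h2

-- Nat.toDigits via Nat.digits
lemma toDigitsCore_eq (n : Nat) : ∀ (f : Nat) (ds : List Char), 0 < n → n < f →
    Nat.toDigitsCore 10 f n ds = ((Nat.digits 10 n).map Nat.digitChar).reverse ++ ds := by
  induction n using Nat.strong_induction_on with
  | _ n ih =>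
    intro f ds hn hf
    match f with
    | 0 => omega
    | f + 1 =>
      rw [Nat.toDigitsCore]
      rw [Nat.digits_def' (by omega : 1 < 10) hn]
      by_cases h0 : n / 10 = 0
      · have hnil : Nat.digits 10 (n / 10) = [] := by rw [h0]; simp
        simp [h0, hnil]
      · have hlt : n / 10 < n := Nat.div_lt_self hn (by omega)
        rw [if_neg h0, ih (n / 10) hlt f _ (Nat.pos_of_ne_zero h0) (by omega)]
        simp

lemma toDigits_eq (n : Nat) (hn : 0 < n) :
    Nat.toDigits 10 n = ((Nat.digits 10 n).map Nat.digitChar).reverse :=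
  by simpa using toDigitsCore_eq n (n + 1) [] hn (by omega)

lemma digitChar_inj_lt : ∀ d < 10, ∀ e < 10, Nat.digitChar d = Nat.digitChar e → d = e := by
  decide

lemma nodup_map_digitChar (ds : List Nat) (hlt : ∀ d ∈ ds, d < 10) :
    (ds.map Nat.digitChar).Nodup ↔ ds.Nodup := by
  constructor
  · exact List.Nodup.of_map _
  · intro h
    exact (List.nodup_map_iff_inj_on h).mpr
      (fun x hx y hy => digitChar_inj_lt x (hlt x hx) y (hlt y hy))

-- A's loop returns true iff the remaining digits together with the seen ones repeat
lemma duplicateGo_eq (n : Nat) : ∀ seen : List Int, seen.Nodup →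
    duplicateGo (n : Int) seen
      = !decide (seen ++ (Nat.digits 10 n).map (fun (d : Nat) => (d : Int))).Nodup := by
  induction n using Nat.strong_induction_on with
  | _ n ih =>
    intro seen hseen
    rw [duplicateGo]
    by_cases hn : (n : Int) > 0
    · have hn' : 0 < n := by exact_mod_cast hn
      have hmod : PySem.Int.mod (n : Int) 10 = ((n % 10 : Nat) : Int) := by
        unfold PySem.Int.mod
        rw [Int.fmod_eq_emod]
        push_cast
        norm_num
      have hdiv : PySem.Int.floordiv (n : Int) 10 = ((n / 10 : Nat) : Int) := by
        unfold PySem.Int.floordiv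
        rw [Int.fdiv_eq_ediv]
        push_cast
        norm_num
      rw [dif_pos hn]
      simp only [hmod, hdiv]
      rw [Nat.digits_def' (by omega : 1 < 10) hn']
      by_cases hmem : ((n % 10 : Nat) : Int) ∈ seen
      · rw [if_pos hmem]
        have hnot : ¬ (seen ++ ((n % 10 : Nat) : Int) :: (Nat.digits 10 (n / 10)).map
            (fun (d : Nat) => (d : Int))).Nodup := by
          intro h
          exact (List.nodup_append.mp h).2.2 _ hmem _ (List.mem_cons_self ..) rfl
        simp only [List.map_cons, hnot, decide_false, Bool.not_false]
      · rw [if_neg hmem]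
        have hseen' : (seen ++ [((n % 10 : Nat) : Int)]).Nodup :=
          hseen.append (List.nodup_singleton _)
            (by rw [List.disjoint_singleton]; exact hmem)
        rw [ih (n / 10) (Nat.div_lt_self hn' (by omega)) _ hseen']
        simp [List.append_assoc]
    · have : n = 0 := by omega
      subst this
      rw [dif_neg hn]
      simp [hseen]

theorem duplicate_digit_spec' (num : Int) :
    duplicate_digit num = duplicate_digit_alt num := by
  unfold duplicate_digit duplicate_digit_alt
  by_cases hpos : num ≤ 0
  · rw [duplicateGo, dif_neg (by omega), if_pos hpos]
  · rw [if_neg hpos]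
    have hnum : num = ((num.toNat : Nat) : Int) := by omega
    have hn' : 0 < num.toNat := by omega
    have hd10 : ∀ d ∈ Nat.digits 10 num.toNat, d < 10 :=
      fun d hd => Nat.digits_lt_base (by omega) hd
    -- B's character list is the reversed digit-character list
    have hchars : (PySem.Int.toStr num).toList
        = ((Nat.digits 10 num.toNat).map Nat.digitChar).reverse := by
      rw [PySem.Int.toList_toStr]
      unfold PySem.Int.toChars
      rw [if_neg (by omega), toDigits_eq _ hn']
    -- A's loop is the nodup test of the digit list
    have hA : duplicateGo num []
        = !decide ((Nat.digits 10 num.toNat).map (fun (d : Nat) => (d : Int))).Nodup := by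
      conv_lhs => rw [hnum]
      rw [duplicateGo_eq num.toNat [] List.nodup_nil]
      simp only [List.nil_append]
      exact congrArg Bool.not (decide_eq_decide.mpr Iff.rfl)
    rw [hA]
    simp only [hchars, PySem.Set.len, PySem.Str.len, ← decide_not]
    refine decide_eq_decide.mpr ?_
    rw [not_congr (List.nodup_map_iff (fun a b h => by simpa using h :
        Function.Injective (fun d : Nat => (d : Int))))]
    rw [Ne, Nat.cast_inj, ofList_length_eq_iff, List.nodup_reverse,
      nodup_map_digitChar _ hd10]

-- ===== VERDICT (by name: the statement is the Claim_ definition above) =====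
theorem duplicate_digit_spec : Claim_equal_duplicate_digit := by
  intro num _
  unfold Spec_duplicate_digit
  exact duplicate_digit_spec' num
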